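-- pv_equiv track=rewrite | github.com/JaviMaligno/AoC | Day15/C15.py | cover_all
-- ===== SOURCE A (Python) =====
-- def cover_all(min_max,row_length = 4000000):
--     ordered = sorted(min_max)
--     #if ordered[0][0] > 0:
--      #   return 0
--     #if ordered[-1][1] < row_length:
--      #   return row_length
--     current = ordered[0]
--     for i in range(1,len(ordered)):
--         if current[1] >= ordered[i][1]:
--             continue
--         elif current[1] +1 < ordered[i][0]:
--             return current[1] +1
--         else:
--             current = ordered[i]
--     # for (_,ma1),(mi2,_) in zip(ordered[:-1],ordered[1:]):
--     #     if ma1+1 < mi2: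
--     #         return ma1+1
--     return None
-- ===== SOURCE B (Python) =====
-- def cover_all(min_max, row_length=4000000):
--     ordered = sorted(min_max)
--     # Phase 1: materialise the list of maximal merged coverage blocks.
--     blocks = []
--     cur_lo, cur_hi = ordered[0]
--     for lo, hi in ordered[1:]:
--         if hi <= cur_hi:
--             continue  # dominated interval: adds no new coverage
--         if lo <= cur_hi + 1:
--             cur_hi = hi  # extends the current block
--         else:
--             blocks.append((cur_lo, cur_hi))
--             cur_lo, cur_hi = lo, hi
--     blocks.append((cur_lo, cur_hi))
--     # Phase 2: scan adjacent blocks for the first gap.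
--     for (_, ahi), (blo, _) in zip(blocks, blocks[1:]):
--         if blo > ahi + 1:
--             return ahi + 1
--     return None
-- ===== Notes on version B (the rewrite author's own statement) =====
-- stated objective: alternative
-- what changed: A detects the gap inline during a single early-return sweep over the sorted intervals; B first materialises the full list of maximal merged coverage blocks and then scans adjacent blocks in a separate second pass for the first gap.
import Mathlib
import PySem

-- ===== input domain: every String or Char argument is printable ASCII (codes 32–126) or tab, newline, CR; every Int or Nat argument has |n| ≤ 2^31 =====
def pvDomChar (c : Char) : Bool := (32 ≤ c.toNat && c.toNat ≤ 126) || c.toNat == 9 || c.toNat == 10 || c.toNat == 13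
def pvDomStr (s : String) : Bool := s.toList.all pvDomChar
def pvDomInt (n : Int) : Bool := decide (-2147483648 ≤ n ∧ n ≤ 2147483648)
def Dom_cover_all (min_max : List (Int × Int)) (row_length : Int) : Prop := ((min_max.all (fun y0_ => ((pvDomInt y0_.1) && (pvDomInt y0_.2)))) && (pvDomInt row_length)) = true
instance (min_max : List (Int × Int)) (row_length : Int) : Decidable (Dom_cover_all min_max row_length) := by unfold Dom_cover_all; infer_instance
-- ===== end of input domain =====

-- ===== PORT A =====
-- B builds the merged-block list first and gap-scans it in a second pass; A early-returns inline.
-- Both Pythons raise IndexError on an empty list (ordered[0]); Pre_ excludes exactly that input.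
-- A's 'for i in range(1,len(ordered))' loop, carrying 'current' (the last adopted interval).
def coverLoop (current : Int × Int) : List (Int × Int) → Option Int
  | [] => none
  | q :: rest =>
    if current.2 ≥ q.2 then coverLoop current rest
    else if current.2 + 1 < q.1 then some (current.2 + 1)
    else coverLoop q rest

def cover_all (min_max : List (Int × Int)) (row_length : Int) : Option Int :=
  match PySem.List.sorted2 min_max (fun p => p.1) (fun p => p.2) with
  | [] => none  -- unreachable under Pre_ (Python raises IndexError here)
  | c :: rest => coverLoop c rest

-- ===== PORT B =====
-- Phase 1: fold the remaining sorted intervals into the list of maximal merged blocks.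
def mergeBlocks (blocks : List (Int × Int)) (cur : Int × Int) : List (Int × Int) → List (Int × Int)
  | [] => blocks ++ [cur]
  | q :: rest =>
    if q.2 ≤ cur.2 then mergeBlocks blocks cur rest
    else if q.1 ≤ cur.2 + 1 then mergeBlocks blocks (cur.1, q.2) rest
    else mergeBlocks (blocks ++ [cur]) q rest

-- Phase 2: first gap between adjacent blocks (the zip scan).
def gapScan : List (Int × Int) → Option Int
  | [] => none
  | [_] => none
  | a :: b :: rest => if b.1 > a.2 + 1 then some (a.2 + 1) else gapScan (b :: rest)

def cover_all_alt (min_max : List (Int × Int)) (row_length : Int) : Option Int :=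
  match PySem.List.sorted2 min_max (fun p => p.1) (fun p => p.2) with
  | [] => none  -- unreachable under Pre_ (Python raises IndexError here)
  | c :: rest => gapScan (mergeBlocks [] c rest)

-- ===== PRECONDITION & SPEC =====
-- Both Pythons raise IndexError on the empty list; Pre_ excludes exactly it.
def Pre_cover_all (min_max : List (Int × Int)) (row_length : Int) : Prop := min_max ≠ []
instance (min_max : List (Int × Int)) (row_length : Int) : Decidable (Pre_cover_all min_max row_length) := by unfold Pre_cover_all; infer_instance
def pvWitness_cover_all : (List (Int × Int)) × Int := ([(0, 3), (5, 9)], 10)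
def Spec_cover_all (min_max : List (Int × Int)) (row_length : Int) (out : Option Int) : Prop := out = cover_all_alt min_max row_length
instance (min_max : List (Int × Int)) (row_length : Int) (out : Option Int) : Decidable (Spec_cover_all min_max row_length out) := by unfold Spec_cover_all; infer_instance

-- ===== CLAIM (what is proved, stated in full; the proofs are below) =====
def Claim_equal_cover_all : Prop := ∀ (min_max : List (Int × Int)) (row_length : Int), Dom_cover_all min_max row_length → Pre_cover_all min_max row_length → Spec_cover_all min_max row_length (cover_all min_max row_length)

-- ===== LEMMAS AND PROOFS =====

-- A's loop only ever reads the second component of 'current'.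
theorem coverLoop_snd (l : List (Int × Int)) (a b : Int × Int) (h : a.2 = b.2) :
    coverLoop a l = coverLoop b l := by
  induction l generalizing a b with
  | nil => rfl
  | cons q rest ih =>
    simp only [coverLoop, h]
    split_ifs with h1 h2
    · exact ih a b h
    · rfl
    · rfl

-- the accumulator is only prepended to
theorem mergeBlocks_acc (l : List (Int × Int)) (acc : List (Int × Int)) (cur : Int × Int) :
    mergeBlocks acc cur l = acc ++ mergeBlocks [] cur l := by
  induction l generalizing acc cur with
  | nil => simp [mergeBlocks]
  | cons q rest ih =>
    simp only [mergeBlocks, List.nil_append]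
    split_ifs with h1 h2
    · exact ih acc cur
    · exact ih acc (cur.1, q.2)
    · rw [ih (acc ++ [cur]) q, ih [cur] q]
      simp

-- the first merged block starts where 'cur' starts
theorem mergeBlocks_head (l : List (Int × Int)) (cur : Int × Int) :
    ∃ h t, mergeBlocks [] cur l = (cur.1, h) :: t := by
  induction l generalizing cur with
  | nil => exact ⟨cur.2, [], rfl⟩
  | cons q rest ih =>
    simp only [mergeBlocks, List.nil_append]
    split_ifs with h1 h2
    · exact ih cur
    · exact ih (cur.1, q.2)
    · rw [mergeBlocks_acc rest [cur] q]
      exact ⟨cur.2, mergeBlocks [] q rest, rfl⟩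

theorem coverLoop_eq_gapScan (l : List (Int × Int)) (cur : Int × Int) :
    coverLoop cur l = gapScan (mergeBlocks [] cur l) := by
  induction l generalizing cur with
  | nil => rfl
  | cons q rest ih =>
    simp only [coverLoop, mergeBlocks, ge_iff_le, List.nil_append]
    by_cases h1 : q.2 ≤ cur.2
    · simp only [if_pos h1]; exact ih cur
    · simp only [if_neg h1]
      by_cases h2 : cur.2 + 1 < q.1
      · -- gap: A returns; B appends 'cur' and the first later block starts at q.1 > cur.2 + 1
        have h2' : ¬ q.1 ≤ cur.2 + 1 := by omega
        simp only [if_pos h2, if_neg h2']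
        rw [mergeBlocks_acc rest [cur] q]
        obtain ⟨h, t, he⟩ := mergeBlocks_head rest q
        rw [he]
        simp only [List.cons_append, List.nil_append, gapScan, gt_iff_lt]
        rw [if_pos h2]
      · -- merge: B keeps cur.1 but A adopts q; second components agree
        have h2' : q.1 ≤ cur.2 + 1 := by omega
        simp only [if_neg h2, if_pos h2']
        rw [coverLoop_snd rest q (cur.1, q.2) rfl, ih (cur.1, q.2)]

-- ===== VERDICT (by name: the statement is the Claim_ definition above) =====
theorem cover_all_spec : Claim_equal_cover_all := by
  intro mm rl _ _
  unfold Spec_cover_all cover_all cover_all_alt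
  cases PySem.List.sorted2 mm (fun p => p.1) (fun p => p.2) with
  | nil => rfl
  | cons c rest => exact coverLoop_eq_gapScan rest c
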